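-- pv_equiv track=rewrite | github.com/gideonn/hadoopKMeans | src/results.py | createIncidenceMatrix
-- ===== SOURCE A (Python) =====
-- def createIncidenceMatrix(cluster_matrix, ground_truth_matrix):
--     Matrix = [[0 for x in range(2)] for y in range(2)]
--     for i in range(len(cluster_matrix)):
--         for j in range(len(cluster_matrix)):
--             if cluster_matrix[i][j] == ground_truth_matrix[i][j]:
--                 if cluster_matrix[i][j] == 1:
--                     Matrix[0][0] += 1 #same cluster,same cluster
--                 else:
--                     Matrix[1][1] += 1 #different cluster, different cluster
--             else:
--                 if cluster_matrix[i][j] == 1: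
--                     Matrix[0][1] += 1 #different cluster, same cluster
--                 else:
--                     Matrix[1][0] += 1 #same cluster, different cluster
--     #print Matrix
--     return Matrix
-- ===== SOURCE B (Python) =====
-- def createIncidenceMatrix(cluster_matrix, ground_truth_matrix):
--     n = len(cluster_matrix)
--     rng = range(n)
--     a00 = sum(1 for i in rng for j in rng
--               if cluster_matrix[i][j] == 1 and ground_truth_matrix[i][j] == 1)
--     a01 = sum(1 for i in rng for j in rng
--               if cluster_matrix[i][j] == 1 and ground_truth_matrix[i][j] != 1)
--     a11 = sum(1 for i in rng for j in rng
--               if cluster_matrix[i][j] != 1 and cluster_matrix[i][j] == ground_truth_matrix[i][j])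
--     a10 = sum(1 for i in rng for j in rng
--               if cluster_matrix[i][j] != 1 and cluster_matrix[i][j] != ground_truth_matrix[i][j])
--     return [[a00, a01], [a10, a11]]
-- ===== Notes on version B (the rewrite author's own statement) =====
-- stated objective: alternative
-- what changed: Replaces the single bucketing pass that mutates a 2x2 matrix through nested ifs with four independent counting scans, one per cell, assembled into the result literal.
import Mathlib
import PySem

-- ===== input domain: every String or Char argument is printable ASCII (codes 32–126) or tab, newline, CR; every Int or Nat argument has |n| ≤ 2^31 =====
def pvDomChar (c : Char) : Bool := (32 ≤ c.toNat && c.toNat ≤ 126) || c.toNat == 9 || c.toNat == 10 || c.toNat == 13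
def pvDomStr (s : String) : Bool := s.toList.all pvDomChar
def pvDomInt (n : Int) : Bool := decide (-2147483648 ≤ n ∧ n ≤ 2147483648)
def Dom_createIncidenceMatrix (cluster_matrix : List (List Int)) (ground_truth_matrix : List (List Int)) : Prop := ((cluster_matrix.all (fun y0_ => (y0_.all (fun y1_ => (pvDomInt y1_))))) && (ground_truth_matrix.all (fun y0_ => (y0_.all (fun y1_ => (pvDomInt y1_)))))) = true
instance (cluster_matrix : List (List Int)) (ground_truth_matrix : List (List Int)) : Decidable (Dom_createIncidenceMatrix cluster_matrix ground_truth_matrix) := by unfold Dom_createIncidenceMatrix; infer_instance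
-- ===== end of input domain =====

-- B replaces A's single bucketing pass (mutating a 2x2 matrix via nested ifs) with four
-- independent counting scans, one per cell (objective: alternative, same cost).

-- m[i][j], exact under Pre_ (indices in range; outside range Python raises IndexError)
def pvCell (m : List (List Int)) (i j : Int) : Int :=
  PySem.List.pyGetD (PySem.List.pyGetD m i []) j 0

-- ===== PORT A =====
def createIncidenceMatrix (cluster_matrix : List (List Int)) (ground_truth_matrix : List (List Int)) : List (List Int) :=
  let Matrix : List (List Int) := [[0, 0], [0, 0]]
  (PySem.List.pyRange 0 (cluster_matrix.length : Int) 1).foldl (fun M i =>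
    (PySem.List.pyRange 0 (cluster_matrix.length : Int) 1).foldl (fun M j =>
      if pvCell cluster_matrix i j = pvCell ground_truth_matrix i j then
        if pvCell cluster_matrix i j = 1 then
          M.modify 0 (fun r => r.modify 0 (· + 1))
        else
          M.modify 1 (fun r => r.modify 1 (· + 1))
      else
        if pvCell cluster_matrix i j = 1 then
          M.modify 0 (fun r => r.modify 1 (· + 1))
        else
          M.modify 1 (fun r => r.modify 0 (· + 1))) M) Matrix

-- ===== PORT B =====
-- one counting scan: sum(1 for i in rng for j in rng if p(cm[i][j], gm[i][j]))
def pvCount (cluster_matrix ground_truth_matrix : List (List Int)) (p : Int → Int → Bool) : Int :=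
  let rng := PySem.List.pyRange 0 (cluster_matrix.length : Int) 1
  rng.foldl (fun acc i =>
    rng.foldl (fun acc j =>
      acc + (if p (pvCell cluster_matrix i j) (pvCell ground_truth_matrix i j) then 1 else 0)) acc) 0

def createIncidenceMatrix_alt (cluster_matrix : List (List Int)) (ground_truth_matrix : List (List Int)) : List (List Int) :=
  let a00 := pvCount cluster_matrix ground_truth_matrix (fun cv gv => cv == 1 && gv == 1)
  let a01 := pvCount cluster_matrix ground_truth_matrix (fun cv gv => cv == 1 && gv != 1)
  let a11 := pvCount cluster_matrix ground_truth_matrix (fun cv gv => cv != 1 && cv == gv)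
  let a10 := pvCount cluster_matrix ground_truth_matrix (fun cv gv => cv != 1 && cv != gv)
  [[a00, a01], [a10, a11]]

-- ===== PRECONDITION & SPEC =====
-- Pre_ excludes exactly the inputs on which the Python A raises IndexError: square region
-- indexing requires every row of cluster_matrix, the first n rows of ground_truth_matrix,
-- and ground_truth_matrix itself to have length at least n = len(cluster_matrix).
def Pre_createIncidenceMatrix (cluster_matrix : List (List Int)) (ground_truth_matrix : List (List Int)) : Prop :=
  (∀ row ∈ cluster_matrix, cluster_matrix.length ≤ row.length) ∧
  cluster_matrix.length ≤ ground_truth_matrix.length ∧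
  (∀ row ∈ ground_truth_matrix.take cluster_matrix.length, cluster_matrix.length ≤ row.length)
instance (cluster_matrix : List (List Int)) (ground_truth_matrix : List (List Int)) : Decidable (Pre_createIncidenceMatrix cluster_matrix ground_truth_matrix) := by unfold Pre_createIncidenceMatrix; infer_instance

def pvWitness_createIncidenceMatrix : List (List Int) × List (List Int) :=
  ([[1, 0], [0, 1]], [[1, 1], [1, 1]])

def Spec_createIncidenceMatrix (cluster_matrix : List (List Int)) (ground_truth_matrix : List (List Int)) (out : List (List Int)) : Prop := out = createIncidenceMatrix_alt cluster_matrix ground_truth_matrix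
instance (cluster_matrix : List (List Int)) (ground_truth_matrix : List (List Int)) (out : List (List Int)) : Decidable (Spec_createIncidenceMatrix cluster_matrix ground_truth_matrix out) := by unfold Spec_createIncidenceMatrix; infer_instance

-- ===== CLAIM (what is proved, stated in full; the proofs are below) =====
def Claim_equal_createIncidenceMatrix : Prop := ∀ (cluster_matrix : List (List Int)) (ground_truth_matrix : List (List Int)), Dom_createIncidenceMatrix cluster_matrix ground_truth_matrix → Pre_createIncidenceMatrix cluster_matrix ground_truth_matrix → Spec_createIncidenceMatrix cluster_matrix ground_truth_matrix (createIncidenceMatrix cluster_matrix ground_truth_matrix)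

-- ===== LEMMAS AND PROOFS =====

-- nested foldl over two ranges = foldl over the flattened pair list
theorem pv_foldl_nested {α β γ : Type} (f : α → β → γ → α) (l1 : List β) (l2 : List γ) (init : α) :
    l1.foldl (fun a x => l2.foldl (fun a y => f a x y) a) init
      = (l1.flatMap (fun x => l2.map (fun y => (x, y)))).foldl (fun a p => f a p.1 p.2) init := by
  induction l1 generalizing init with
  | nil => rfl
  | cons x xs ih =>
    simp only [List.foldl_cons, List.flatMap_cons, List.foldl_append, List.foldl_map, ih]

-- an accumulating 0/1-sum foldl is countP plus the start value
theorem pv_foldl_count {γ : Type} (p : γ → Bool) (l : List γ) (init : Int) :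
    l.foldl (fun a y => a + (if p y then 1 else 0)) init = init + (l.countP p : Int) := by
  induction l generalizing init with
  | nil => simp
  | cons y ys ih =>
    simp only [List.foldl_cons, ih, List.countP_cons]
    by_cases h : p y <;> simp [h] <;> ring

-- A's matrix fold over any pair list, characterised by the four counts
theorem pv_foldA (cm gm : List (List Int)) (P : List (Int × Int)) (a b c d : Int) :
    P.foldl (fun M p =>
        if pvCell cm p.1 p.2 = pvCell gm p.1 p.2 then
          if pvCell cm p.1 p.2 = 1 then M.modify 0 (fun r => r.modify 0 (· + 1))
          else M.modify 1 (fun r => r.modify 1 (· + 1))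
        else
          if pvCell cm p.1 p.2 = 1 then M.modify 0 (fun r => r.modify 1 (· + 1))
          else M.modify 1 (fun r => r.modify 0 (· + 1))) [[a, b], [c, d]]
      = [[a + (P.countP (fun p => pvCell cm p.1 p.2 == 1 && pvCell gm p.1 p.2 == 1) : Int),
          b + (P.countP (fun p => pvCell cm p.1 p.2 == 1 && pvCell gm p.1 p.2 != 1) : Int)],
         [c + (P.countP (fun p => pvCell cm p.1 p.2 != 1 && pvCell cm p.1 p.2 != pvCell gm p.1 p.2) : Int),
          d + (P.countP (fun p => pvCell cm p.1 p.2 != 1 && pvCell cm p.1 p.2 == pvCell gm p.1 p.2) : Int)]] := by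
  induction P generalizing a b c d with
  | nil => simp
  | cons q Q ih =>
    obtain ⟨qi, qj⟩ := q
    simp only [List.foldl_cons, List.countP_cons]
    generalize pvCell cm qi qj = cv
    generalize pvCell gm qi qj = gv
    simp [List.modify] at ih
    rcases eq_or_ne cv gv with h1 | h1
    · subst h1
      rcases eq_or_ne cv 1 with h2 | h2
      · subst h2
        simp [List.modify, ih]
        omega
      · simp [List.modify, ih, h2]
        omega
    · rcases eq_or_ne cv 1 with h2 | h2
      · subst h2
        simp [List.modify, ih, h1, Ne.symm h1]
        omega
      · simp [List.modify, ih, h1, h2]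
        omega

-- B's counting scan as countP over the same flattened pair list
theorem pv_count_eq (cm gm : List (List Int)) (p : Int → Int → Bool) :
    pvCount cm gm p
      = (((PySem.List.pyRange 0 (cm.length : Int) 1).flatMap
            (fun i => (PySem.List.pyRange 0 (cm.length : Int) 1).map (fun j => (i, j)))).countP
          (fun q => p (pvCell cm q.1 q.2) (pvCell gm q.1 q.2)) : Int) := by
  unfold pvCount
  rw [pv_foldl_nested (fun a x y => a + (if p (pvCell cm x y) (pvCell gm x y) then 1 else 0))]
  rw [pv_foldl_count]
  simp

-- ===== VERDICT (by name: the statement is the Claim_ definition above) =====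
theorem createIncidenceMatrix_spec : Claim_equal_createIncidenceMatrix := by
  intro cm gm _ _
  show createIncidenceMatrix cm gm = createIncidenceMatrix_alt cm gm
  unfold createIncidenceMatrix createIncidenceMatrix_alt
  dsimp only []
  rw [pv_foldl_nested]
  rw [pv_foldA]
  rw [pv_count_eq, pv_count_eq, pv_count_eq, pv_count_eq]
  simp
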